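-- pv_equiv track=rewrite | github.com/valipod/fdtt_ldap | ldap_agent.py | _group_dn
-- ===== SOURCE A (Python) =====
-- def _group_dn(group_id, group_dn_suffix):
--     if group_id is None:
--         id_bits = []
--     else:
--         id_bits = group_id.split('-')
--
--     dn_start = ''
--     for c in range(len(id_bits), 0, -1):
--         dn_start += 'cn=%s,' % '-'.join(id_bits[:c])
--     return dn_start + group_dn_suffix
-- ===== SOURCE B (Python) =====
-- def _group_dn(group_id, group_dn_suffix):
--     id_bits = [] if group_id is None else group_id.split('-')
--
--     def build(bits):
--         if not bits:
--             return group_dn_suffix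
--         return 'cn=%s,' % '-'.join(bits) + build(bits[:-1])
--
--     return build(id_bits)
-- ===== Notes on version B (the rewrite author's own statement) =====
-- stated objective: alternative
-- what changed: Replaces the index loop over decreasing prefix lengths (with repeated slicing id_bits[:c]) by a recursive helper that emits the leaf cn= component and recurses on the parent DN (bits[:-1]), appending the suffix at the empty base case.
import Mathlib
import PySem

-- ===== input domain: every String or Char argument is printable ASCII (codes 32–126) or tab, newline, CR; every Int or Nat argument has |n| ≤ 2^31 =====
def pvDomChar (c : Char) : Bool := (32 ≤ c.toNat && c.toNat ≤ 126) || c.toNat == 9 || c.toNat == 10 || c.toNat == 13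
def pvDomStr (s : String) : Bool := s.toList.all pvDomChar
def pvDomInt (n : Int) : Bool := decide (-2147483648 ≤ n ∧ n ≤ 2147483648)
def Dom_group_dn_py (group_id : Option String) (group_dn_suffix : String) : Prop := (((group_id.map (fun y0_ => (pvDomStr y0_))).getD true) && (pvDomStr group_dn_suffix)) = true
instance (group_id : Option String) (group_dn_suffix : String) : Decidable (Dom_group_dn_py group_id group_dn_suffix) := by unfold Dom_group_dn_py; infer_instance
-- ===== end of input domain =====

-- B recurses on the DN parent hierarchy (dropping the last id bit) instead of A's
-- index loop over decreasing prefix lengths; an alternative decomposition, same result.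

-- ===== PORT A =====
def group_dn_py (group_id : Option String) (group_dn_suffix : String) : String :=
  let id_bits : List String :=
    match group_id with
    | none => []
    | some gid => (PySem.Str.split? gid "-").getD []
  let dn_start : String :=
    (PySem.List.pyRange (id_bits.length : Int) 0 (-1)).foldl
      (fun acc c => acc ++ ("cn=" ++ PySem.Str.join "-" (PySem.List.slice id_bits none (some c)) ++ ",")) ""
  dn_start ++ group_dn_suffix

-- ===== PORT B =====
def group_dn_build (group_dn_suffix : String) (bits : List String) : String :=
  if bits = [] then group_dn_suffix
  else ("cn=" ++ PySem.Str.join "-" bits ++ ",") ++ group_dn_build group_dn_suffix bits.dropLast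
termination_by bits.length
decreasing_by
  rename_i h
  have : 0 < bits.length := List.length_pos_iff.mpr h
  simp [List.length_dropLast]; omega

def group_dn_py_alt (group_id : Option String) (group_dn_suffix : String) : String :=
  let id_bits : List String :=
    match group_id with
    | none => []
    | some gid => (PySem.Str.split? gid "-").getD []
  group_dn_build group_dn_suffix id_bits

-- ===== PRECONDITION & SPEC =====
def Spec_group_dn_py (group_id : Option String) (group_dn_suffix : String) (out : String) : Prop := out = group_dn_py_alt group_id group_dn_suffix
instance (group_id : Option String) (group_dn_suffix : String) (out : String) : Decidable (Spec_group_dn_py group_id group_dn_suffix out) := by unfold Spec_group_dn_py; infer_instance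

-- ===== CLAIM (what is proved, stated in full; the proofs are below) =====
def Claim_equal_group_dn_py : Prop := ∀ (group_id : Option String) (group_dn_suffix : String), Dom_group_dn_py group_id group_dn_suffix → Spec_group_dn_py group_id group_dn_suffix (group_dn_py group_id group_dn_suffix)

-- ===== LEMMAS AND PROOFS =====

-- shift the accumulator of a string-appending fold out front
theorem str_foldl_shift (h : Int → String) (l : List Int) (s : String) :
    l.foldl (fun a c => a ++ h c) s = s ++ l.foldl (fun a c => a ++ h c) "" := by
  induction l generalizing s with
  | nil => simp
  | cons c cs ih =>
    simp only [List.foldl_cons]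
    rw [ih (s ++ h c), ih ("" ++ h c)]
    simp [String.append_assoc]

-- A's loop over prefix lengths equals B's recursion on dropLast
theorem loop_eq_build (suffix : String) (bits : List String) :
    (PySem.List.pyRange (bits.length : Int) 0 (-1)).foldl
        (fun acc c => acc ++ ("cn=" ++ PySem.Str.join "-" (PySem.List.slice bits none (some c)) ++ ",")) ""
      ++ suffix = group_dn_build suffix bits := by
  induction bits using List.reverseRecOn with
  | nil =>
    rw [PySem.List.pyRange_neg_one_eq_nil (by simp)]
    simp [group_dn_build]
  | append_singleton l a ih =>
    have hne : l ++ [a] ≠ [] := by simp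
    rw [group_dn_build, if_neg hne, List.dropLast_concat]
    have hlen : ((l ++ [a]).length : Int) = (l.length : Int) + 1 := by
      simp
    rw [hlen, PySem.List.pyRange_neg_one_cons (by omega)]
    simp only [List.foldl_cons]
    have hsl : PySem.List.slice (l ++ [a]) none (some ((l.length : Int) + 1)) = l ++ [a] := by
      have : (l.length : Int) + 1 = ((l.length + 1 : Nat) : Int) := by push_cast; ring
      rw [this, PySem.List.slice_to_natCast]
      simp
    rw [hsl]
    have hcongr :
        (PySem.List.pyRange ((l.length : Int) + 1 - 1) 0 (-1)).foldl
          (fun acc c => acc ++ ("cn=" ++ PySem.Str.join "-" (PySem.List.slice (l ++ [a]) none (some c)) ++ ",")) ("" ++ ("cn=" ++ PySem.Str.join "-" (l ++ [a]) ++ ","))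
        = (PySem.List.pyRange ((l.length : Int)) 0 (-1)).foldl
          (fun acc c => acc ++ ("cn=" ++ PySem.Str.join "-" (PySem.List.slice l none (some c)) ++ ",")) ("" ++ ("cn=" ++ PySem.Str.join "-" (l ++ [a]) ++ ",")) := by
      have hr : (l.length : Int) + 1 - 1 = (l.length : Int) := by ring
      rw [hr]
      apply PySem.List.foldl_congr_mem
      intro acc c hc
      have hc' := (PySem.List.mem_pyRange_neg_one).mp hc
      have hc0 : 0 < c := hc'.1
      have hcn : c ≤ (l.length : Int) := hc'.2
      have hcnat : c = ((c.toNat : Nat) : Int) := by omega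
      rw [hcnat, PySem.List.slice_to_natCast, PySem.List.slice_to_natCast]
      have htake : (l ++ [a]).take c.toNat = l.take c.toNat := by
        rw [List.take_append_of_le_length (by omega)]
      rw [htake]
    rw [hcongr]
    rw [str_foldl_shift (fun c => "cn=" ++ PySem.Str.join "-" (PySem.List.slice l none (some c)) ++ ",")
         _ ("" ++ ("cn=" ++ PySem.Str.join "-" (l ++ [a]) ++ ","))]
    rw [← ih]
    simp [String.append_assoc]

-- ===== VERDICT (by name: the statement is the Claim_ definition above) =====
theorem group_dn_py_spec : Claim_equal_group_dn_py := by
  intro group_id group_dn_suffix _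
  unfold Spec_group_dn_py group_dn_py group_dn_py_alt
  cases group_id with
  | none => exact loop_eq_build group_dn_suffix []
  | some gid => exact loop_eq_build group_dn_suffix ((PySem.Str.split? gid "-").getD [])
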